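-- pv_equiv track=rewrite | github.com/sliberta2023/investing | scripts/extract_transcript.py | parse_webvtt
-- ===== SOURCE A (Python) =====
-- from typing import Iterable, List, Optional, Tuple
--
-- def parse_webvtt(data: str) -> List[str]:
--     """Convert a WebVTT/SRT caption file into a list of text cues."""
--     cues: List[str] = []
--     buffer: List[str] = []
--     skipping_note = False
--     for raw_line in data.splitlines():
--         line = raw_line.strip("\ufeff \t")  # also remove BOM if present
--         if not line:
--             if buffer:
--                 cues.append(" ".join(buffer).strip())
--                 buffer.clear()
--             skipping_note = False
--             continue
--         if line.upper().startswith("WEBVTT"):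
--             continue
--         if line.upper().startswith("NOTE"):
--             skipping_note = True
--             continue
--         if skipping_note:
--             continue
--         if "-->" in line:  # timing line
--             continue
--         # Most SRT files number the cues.  Skip pure integers.
--         if line.isdigit():
--             continue
--         buffer.append(line)
--     if buffer:
--         cues.append(" ".join(buffer).strip())
--     return [cue for cue in cues if cue]
-- ===== SOURCE B (Python) =====
-- def parse_webvtt(data):
--     """Convert a WebVTT/SRT caption file into a list of text cues."""
--     # Pass 1: group stripped non-blank lines into blocks separated by blank lines.
--     blocks = []
--     current = []
--     for raw_line in data.splitlines():
--         line = raw_line.strip("\ufeff \t")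
--         if line:
--             current.append(line)
--         elif current:
--             blocks.append(current)
--             current = []
--     if current:
--         blocks.append(current)
--     # Pass 2: extract the text lines of each block; a NOTE line ends the block's text.
--     cues = []
--     for block in blocks:
--         texts = []
--         for line in block:
--             upper = line.upper()
--             if upper.startswith("WEBVTT"):
--                 continue
--             if upper.startswith("NOTE"):
--                 break
--             if "-->" in line or line.isdigit():
--                 continue
--             texts.append(line)
--         cue = " ".join(texts).strip()
--         if cue:
--             cues.append(cue)
--     return cues
-- ===== Notes on version B (the rewrite author's own statement) =====
-- stated objective: alternative
-- what changed: A's single pass with a three-part mutable state machine (cues, buffer, skipping_note flag) is replaced by a two-pass decomposition: first group stripped non-blank lines into blank-separated blocks, then extract each block's text lines (NOTE truncating only its own block) and join them into cues.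
import Mathlib
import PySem

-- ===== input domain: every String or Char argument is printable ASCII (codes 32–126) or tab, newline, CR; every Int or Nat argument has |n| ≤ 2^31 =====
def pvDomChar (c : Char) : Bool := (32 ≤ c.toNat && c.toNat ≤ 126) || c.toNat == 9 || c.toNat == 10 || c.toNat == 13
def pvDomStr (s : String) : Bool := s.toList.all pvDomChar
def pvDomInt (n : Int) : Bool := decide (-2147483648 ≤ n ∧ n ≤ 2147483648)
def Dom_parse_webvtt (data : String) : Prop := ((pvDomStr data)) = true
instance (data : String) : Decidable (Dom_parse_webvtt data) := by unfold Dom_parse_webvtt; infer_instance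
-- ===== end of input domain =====

-- B replaces A's one-pass three-part state machine (cues/buffer/note flag) by a two-pass
-- decomposition: group lines into blank-separated blocks, then extract each block's text
-- (objective: alternative decomposition, same O(n) cost).

-- ===== PORT A =====
-- loop body of A's single for-loop, state = (cues, buffer, skipping_note)
def aStep (st : List String × List String × Bool) (raw_line : String) :
    List String × List String × Bool :=
  let cues := st.1
  let buffer := st.2.1
  let skipping_note := st.2.2
  let line := PySem.Str.stripChars raw_line "\uFEFF \t"
  if line = "" then
    (if buffer ≠ [] then cues ++ [PySem.Str.strip (PySem.Str.join " " buffer)] else cues, [], false)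
  else if PySem.Str.startswith (PySem.Str.upper line) "WEBVTT" then st
  else if PySem.Str.startswith (PySem.Str.upper line) "NOTE" then (cues, buffer, true)
  else if skipping_note then st
  else if PySem.Str.isIn "-->" line then st
  else if PySem.Str.strIsdigit line then st
  else (cues, buffer ++ [line], skipping_note)

def parse_webvtt (data : String) : List String :=
  let r := (PySem.Str.splitlines data).foldl aStep ([], [], false)
  let cues := if r.2.1 ≠ [] then r.1 ++ [PySem.Str.strip (PySem.Str.join " " r.2.1)] else r.1
  cues.filter (fun cue => cue ≠ "")

-- ===== PORT B =====
-- pass-1 loop body: group non-blank stripped lines into blocks, state = (blocks, current)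
def bGroupStep (st : List (List String) × List String) (raw_line : String) :
    List (List String) × List String :=
  let line := PySem.Str.stripChars raw_line "\uFEFF \t"
  if line ≠ "" then (st.1, st.2 ++ [line])
  else if st.2 ≠ [] then (st.1 ++ [st.2], [])
  else st

-- pass-2 inner loop (for-with-break → structural recursion): text lines of one block
def bTexts (block : List String) (texts : List String) : List String :=
  match block with
  | [] => texts
  | line :: rest =>
    let upper := PySem.Str.upper line
    if PySem.Str.startswith upper "WEBVTT" then bTexts rest texts
    else if PySem.Str.startswith upper "NOTE" then texts
    else if PySem.Str.isIn "-->" line || PySem.Str.strIsdigit line then bTexts rest texts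
    else bTexts rest (texts ++ [line])

-- pass-2 outer loop body: append the block's non-empty cue
def bCueStep (cues : List String) (block : List String) : List String :=
  let cue := PySem.Str.strip (PySem.Str.join " " (bTexts block []))
  if cue ≠ "" then cues ++ [cue] else cues

def parse_webvtt_alt (data : String) : List String :=
  let g := (PySem.Str.splitlines data).foldl bGroupStep ([], [])
  let blocks := if g.2 ≠ [] then g.1 ++ [g.2] else g.1
  blocks.foldl bCueStep []

-- ===== PRECONDITION & SPEC =====
def Spec_parse_webvtt (data : String) (out : List String) : Prop := out = parse_webvtt_alt data
instance (data : String) (out : List String) : Decidable (Spec_parse_webvtt data out) := by unfold Spec_parse_webvtt; infer_instance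

-- ===== CLAIM (what is proved, stated in full; the proofs are below) =====
def Claim_equal_parse_webvtt : Prop := ∀ (data : String), Dom_parse_webvtt data → Spec_parse_webvtt data (parse_webvtt data)

-- ===== LEMMAS AND PROOFS =====

-- cue built from a buffer of text lines
def pvMk (texts : List String) : String := PySem.Str.strip (PySem.Str.join " " texts)

-- proof-side recursion computing A's remaining cues from (lines, buffer, note)
def procA : List String → List String → Bool → List String
  | [], buffer, _ => if buffer ≠ [] then [pvMk buffer] else []
  | raw :: rest, buffer, note =>
    let line := PySem.Str.stripChars raw "\uFEFF \t"
    if line = "" then (if buffer ≠ [] then [pvMk buffer] else []) ++ procA rest [] false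
    else if PySem.Str.startswith (PySem.Str.upper line) "WEBVTT" then procA rest buffer note
    else if PySem.Str.startswith (PySem.Str.upper line) "NOTE" then procA rest buffer true
    else if note then procA rest buffer note
    else if PySem.Str.isIn "-->" line then procA rest buffer note
    else if PySem.Str.strIsdigit line then procA rest buffer note
    else procA rest (buffer ++ [line]) note

-- A's per-line transition restricted to (texts, note) — what A's state does inside one block
def scanStep (s : List String × Bool) (line : String) : List String × Bool :=
  if PySem.Str.startswith (PySem.Str.upper line) "WEBVTT" then s
  else if PySem.Str.startswith (PySem.Str.upper line) "NOTE" then (s.1, true)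
  else if s.2 then s
  else if PySem.Str.isIn "-->" line then s
  else if PySem.Str.strIsdigit line then s
  else (s.1 ++ [line], s.2)

-- final flush of A's loop state
def flushA (r : List String × List String × Bool) : List String :=
  if r.2.1 ≠ [] then r.1 ++ [pvMk r.2.1] else r.1

lemma aStep_flush (ls : List String) :
    ∀ (cues buffer : List String) (note : Bool),
    flushA (ls.foldl aStep (cues, buffer, note)) = cues ++ procA ls buffer note := by
  induction ls with
  | nil => intro cues buffer note; by_cases h : buffer = [] <;> simp [flushA, procA, pvMk, h]
  | cons raw rest ih =>
    intro cues buffer note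
    simp only [List.foldl_cons, aStep, procA]
    split_ifs <;> (rw [ih]; try (by_cases hb : buffer = [] <;> simp [hb, pvMk, List.append_assoc]))

lemma scan_note (cur : List String) : ∀ texts, cur.foldl scanStep (texts, true) = (texts, true) := by
  induction cur with
  | nil => intro texts; rfl
  | cons l rest ih =>
    intro texts
    simp only [List.foldl_cons, scanStep]
    split_ifs <;> exact ih texts

lemma scan_bTexts (cur : List String) :
    ∀ texts, (cur.foldl scanStep (texts, false)).1 = bTexts cur texts := by
  induction cur with
  | nil => intro texts; rfl
  | cons l rest ih =>
    intro texts
    simp only [List.foldl_cons, scanStep, bTexts, Bool.or_eq_true]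
    split_ifs with h1 h2 h3 h4 <;>
      simp_all [scan_note]

lemma bGroup_prefix (ls : List String) :
    ∀ (blocks : List (List String)) (cur : List String),
    ls.foldl bGroupStep (blocks, cur) =
      (blocks ++ (ls.foldl bGroupStep ([], cur)).1, (ls.foldl bGroupStep ([], cur)).2) := by
  induction ls with
  | nil => intro blocks cur; simp
  | cons raw rest ih =>
    intro blocks cur
    simp only [List.foldl_cons, bGroupStep]
    split_ifs with h1 h2
    · exact ih blocks (cur ++ [PySem.Str.stripChars raw "\uFEFF \t"])
    · rw [ih (blocks ++ [cur]) [], ih ([] ++ [cur]) []]; simp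
    · exact ih blocks cur

lemma bCue_filter_map (bs : List (List String)) :
    ∀ cues, bs.foldl bCueStep cues =
      cues ++ (bs.map (fun b => pvMk (bTexts b []))).filter (fun c => c ≠ "") := by
  induction bs with
  | nil => intro cues; simp
  | cons b rest ih =>
    intro cues
    simp only [List.foldl_cons, bCueStep, List.map_cons, List.filter_cons, pvMk]
    split_ifs with h <;> simp_all [pvMk]

lemma pvMk_nil : pvMk [] = "" := by decide

lemma flush_cue (cur : List String) :
    ((if (cur.foldl scanStep ([], false)).1 ≠ [] then [pvMk (cur.foldl scanStep ([], false)).1] else []).filter (fun c => c ≠ ""))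
      = ((if cur ≠ [] then [pvMk (bTexts cur [])] else []).filter (fun c => c ≠ "")) := by
  rw [scan_bTexts]
  rcases eq_or_ne cur [] with h | h
  · subst h; rfl
  · rcases eq_or_ne (bTexts cur []) [] with ht | ht <;> simp [h, ht, pvMk_nil]

lemma main_eq (ls : List String) :
    ∀ cur : List String,
    (procA ls (cur.foldl scanStep ([], false)).1 (cur.foldl scanStep ([], false)).2).filter (fun c => c ≠ "") =
    ((if (ls.foldl bGroupStep ([], cur)).2 ≠ []
       then (ls.foldl bGroupStep ([], cur)).1 ++ [(ls.foldl bGroupStep ([], cur)).2]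
       else (ls.foldl bGroupStep ([], cur)).1).map (fun b => pvMk (bTexts b []))).filter (fun c => c ≠ "") := by
  induction ls with
  | nil =>
    intro cur
    simp only [List.foldl_nil, procA]
    rw [flush_cue cur]
    rcases eq_or_ne cur [] with h | h <;> simp [h]
  | cons raw rest ih =>
    intro cur
    simp only [List.foldl_cons, procA, bGroupStep]
    by_cases h1 : PySem.Str.stripChars raw "\uFEFF \t" = ""
    · simp only [h1, if_pos, ne_eq, not_true_eq_false, if_false, List.filter_append]
      rw [flush_cue cur]
      rcases eq_or_ne cur [] with hc | hc
      · subst hc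
        simpa using ih []
      · simp only [hc, ne_eq, not_false_eq_true, if_pos]
        rw [bGroup_prefix rest ([] ++ [cur]) []]
        have hsplit : ∀ (G : List (List String)) (C : List String),
            (if C ≠ [] then ([] ++ [cur] ++ G) ++ [C] else [] ++ [cur] ++ G)
              = [cur] ++ (if C ≠ [] then G ++ [C] else G) := by
          intro G C; split <;> simp
        simp only [hsplit, List.map_append, List.filter_append, List.map_cons, List.map_nil]
        have := ih []
        simp only [List.filter_cons] at *
        simp_all
    · have ih' := ih (cur ++ [PySem.Str.stripChars raw "\uFEFF \t"])
      simp only [List.foldl_append, List.foldl_cons, List.foldl_nil] at ih'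
      simp only [ne_eq, h1, not_false_eq_true, if_true, if_neg]
      rw [← ih']
      simp only [scanStep]
      split_ifs <;> simp_all

-- ===== VERDICT (by name: the statement is the Claim_ definition above) =====
theorem parse_webvtt_spec : Claim_equal_parse_webvtt := by
  intro data _
  show parse_webvtt data = parse_webvtt_alt data
  have hA := aStep_flush (PySem.Str.splitlines data) [] [] false
  simp only [flushA] at hA
  have hM := main_eq (PySem.Str.splitlines data) []
  have hB := bCue_filter_map
    (if ((PySem.Str.splitlines data).foldl bGroupStep ([], [])).2 ≠ []
     then ((PySem.Str.splitlines data).foldl bGroupStep ([], [])).1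
            ++ [((PySem.Str.splitlines data).foldl bGroupStep ([], [])).2]
     else ((PySem.Str.splitlines data).foldl bGroupStep ([], [])).1) []
  simp only [List.foldl_nil] at hM
  simp only [pvMk] at hA hM hB
  simp only [parse_webvtt, parse_webvtt_alt]
  rw [hA, List.nil_append, hM, hB, List.nil_append]
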